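-- pv_equiv track=rewrite | github.com/stephenfinch/Code-Wars | Aug-2020/war_8-30-20.py | missing_alphabets
-- ===== SOURCE A (Python) =====
-- letters = ['a','b','c','d','e','f','g','h','i','j','k','l','m','n','o','p','q','r','s','t','u','v','w','x','y','z']
--
-- def missing_alphabets(s):
-- 	s = list(s)
-- 	s.sort()
-- 	output = []
-- 	while s:
-- 		temp_letters = letters.copy()
-- 		for i in range(len(temp_letters)-1, -1, -1):
-- 			if temp_letters[i] in s:
-- 				s.pop(s.index(temp_letters[i]))
-- 				temp_letters.pop(i)
-- 			else:
-- 				output.append(temp_letters[i])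
-- 	return ''.join(sorted(output))
-- ===== SOURCE B (Python) =====
-- def missing_alphabets(s):
--     counts = {}
--     for ch in s:
--         counts[ch] = counts.get(ch, 0) + 1
--     m = max(counts.values(), default=0)
--     return ''.join(c * (m - counts.get(c, 0)) for c in 'abcdefghijklmnopqrstuvwxyz')
-- ===== Notes on version B (the rewrite author's own statement) =====
-- stated objective: faster
-- what changed: A repeatedly scans the 26-letter alphabet against a shrinking multiset (one pass per maximum multiplicity, with linear 'in'/index/pop scans inside) and sorts the collected output; B counts character frequencies in one pass and emits (maxcount - count[c]) copies of each letter in alphabetical order, closed-form.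
import Mathlib
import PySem

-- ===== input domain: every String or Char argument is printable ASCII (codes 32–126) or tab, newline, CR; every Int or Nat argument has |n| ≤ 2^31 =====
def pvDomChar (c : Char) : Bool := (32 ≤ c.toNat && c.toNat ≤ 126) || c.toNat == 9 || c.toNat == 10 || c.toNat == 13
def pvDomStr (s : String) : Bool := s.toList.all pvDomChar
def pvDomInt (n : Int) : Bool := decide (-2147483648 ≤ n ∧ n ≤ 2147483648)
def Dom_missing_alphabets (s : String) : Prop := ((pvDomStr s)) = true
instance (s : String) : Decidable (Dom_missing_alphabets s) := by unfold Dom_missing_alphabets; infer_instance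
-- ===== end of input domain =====

-- B replaces A's repeated pass-and-remove scans by a single frequency count plus a closed-form
-- emission (maxcount - count[c] copies of each letter in order): an asymptotically faster algorithm.
-- (A sorts a local copy of its input; no caller-visible mutation. A loops forever on inputs
-- containing any character outside 'a'..'z'; Pre_ excludes exactly those.)


-- ===== PORT A =====
-- the module-level constant 'letters'
def pvLetters : List Char :=
  ['a','b','c','d','e','f','g','h','i','j','k','l','m','n','o','p','q','r','s','t','u','v','w','x','y','z']

-- body of the inner 'for i in range(len(temp_letters)-1, -1, -1)' loop, on state (s, output).
-- 's.pop(s.index(x))' removes the first occurrence of x, which is exactly List.erase.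
-- 'temp_letters.pop(i)' while the index runs DOWN never touches a not-yet-visited index, so the
-- downward index loop visits exactly the elements of letters in reverse order.
def pvStep (st : List Char × List Char) (l : Char) : List Char × List Char :=
  if l ∈ st.1 then (st.1.erase l, st.2) else (st.1, st.2 ++ [l])

-- the while-loop over s; fuel only makes the recursion total — on Pre_ inputs the loop performs
-- (max letter multiplicity) ≤ length passes, so fuel = initial length is never exhausted.
def pvLoop : Nat → List Char → List Char → List Char
  | _, [], out => out
  | 0, _ :: _, out => out
  | fuel+1, x :: xs, out =>
      let st := pvLetters.reverse.foldl pvStep (x :: xs, out)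
      pvLoop fuel st.1 st.2

def missing_alphabets (s : String) : String :=
  let sl := PySem.List.sorted s.toList (fun x => x)   -- s = list(s); s.sort()
  String.ofList (PySem.List.sorted (pvLoop sl.length sl []) (fun x => x))   -- ''.join(sorted(output))

-- ===== PORT B =====
-- the string literal 'abcdefghijklmnopqrstuvwxyz' as a char list
def pvAlphabet : List Char :=
  ['a','b','c','d','e','f','g','h','i','j','k','l','m','n','o','p','q','r','s','t','u','v','w','x','y','z']

def missing_alphabets_alt (s : String) : String :=
  -- counts = {}; for ch in s: counts[ch] = counts.get(ch, 0) + 1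
  let counts : PySem.Dict Char Int :=
    s.toList.foldl (fun d ch => d.insert ch (d.getD ch 0 + 1)) PySem.Dict.empty
  -- m = max(counts.values(), default=0)
  let m : Int := PySem.List.maxD counts.values (fun v => v) 0
  -- ''.join(c * (m - counts.get(c, 0)) for c in 'abcdefghijklmnopqrstuvwxyz')
  -- 'c * k' for an Int k is k.toNat copies of c (Python yields '' for k ≤ 0): replicate.toNat is exact.
  String.ofList (pvAlphabet.flatMap (fun c => List.replicate (m - counts.getD c 0).toNat c))

-- ===== PRECONDITION & SPEC =====
-- A's while-loop removes only lowercase letters from s, so A diverges (never returns) as soon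
-- as s contains any other character: Pre_ admits exactly the inputs on which A terminates.
def Pre_missing_alphabets (s : String) : Prop := s.toList.all (fun c => decide (c ∈ pvLetters)) = true
instance (s : String) : Decidable (Pre_missing_alphabets s) := by unfold Pre_missing_alphabets; infer_instance
def pvWitness_missing_alphabets : String := "hello"

def Spec_missing_alphabets (s : String) (out : String) : Prop := out = missing_alphabets_alt s
instance (s : String) (out : String) : Decidable (Spec_missing_alphabets s out) := by unfold Spec_missing_alphabets; infer_instance

-- ===== CLAIM (what is proved, stated in full; the proofs are below) =====
def Claim_equal_missing_alphabets : Prop := ∀ (s : String), Dom_missing_alphabets s → Pre_missing_alphabets s → Spec_missing_alphabets s (missing_alphabets s)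

-- ===== LEMMAS AND PROOFS =====

theorem pv_pass (ls : List Char) (hnd : ls.Nodup) (s out : List Char) :
    (ls.foldl pvStep (s, out)).2 = out ++ ls.filter (fun l => List.count l s = 0)
      ∧ ∀ c : Char, List.count c (ls.foldl pvStep (s, out)).1 =
          if c ∈ ls then List.count c s - 1 else List.count c s := by
  induction ls generalizing s out with
  | nil => simp
  | cons l t ih =>
    rcases List.nodup_cons.mp hnd with ⟨hl, hnd'⟩
    by_cases hmem : l ∈ s
    · have hcnt : List.count l s ≠ 0 := by
        have := List.count_pos_iff.mpr hmem; omega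
      have hstep : pvStep (s, out) l = (s.erase l, out) := by simp [pvStep, hmem]
      rw [List.foldl_cons, hstep]
      obtain ⟨h2, h1⟩ := ih hnd' (s.erase l) out
      constructor
      · rw [h2]
        have : t.filter (fun x => List.count x (s.erase l) = 0)
             = t.filter (fun x => List.count x s = 0) := by
          apply List.filter_congr
          intro x hx
          have : x ≠ l := fun h => hl (h ▸ hx)
          simp [List.count_erase_of_ne this]
        rw [this]
        have : (l :: t).filter (fun x => List.count x s = 0)
             = t.filter (fun x => List.count x s = 0) := by
          simp [hcnt]
        rw [this]
      · intro c
        rw [h1 c]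
        by_cases hc : c = l
        · subst hc
          simp [hl, List.count_erase_self]
        · simp [List.count_erase_of_ne hc, hc]
    · have hcnt : List.count l s = 0 := by simp [List.count_eq_zero]; exact hmem
      have hstep : pvStep (s, out) l = (s, out ++ [l]) := by simp [pvStep, hmem]
      rw [List.foldl_cons, hstep]
      obtain ⟨h2, h1⟩ := ih hnd' s (out ++ [l])
      constructor
      · rw [h2, List.filter_cons]
        simp [hcnt]
      · intro c
        rw [h1 c]
        by_cases hc : c = l
        · subst hc; simp [hl, hcnt]
        · simp [hc]

def pvMx (s : List Char) : Nat := pvLetters.foldl (fun a c => max a (List.count c s)) 0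

theorem pv_foldl_max_sub (ls : List Char) (f : Char → Nat) (a : Nat) :
    ls.foldl (fun m c => max m (f c - 1)) (a - 1) = ls.foldl (fun m c => max m (f c)) a - 1 := by
  induction ls generalizing a with
  | nil => simp
  | cons x t ih =>
    simp only [List.foldl_cons]
    rw [← ih (max a (f x))]
    congr 1
    omega

theorem pv_foldl_max_le (ls : List Char) (f : Char → Nat) (a B : Nat)
    (ha : a ≤ B) (hf : ∀ c ∈ ls, f c ≤ B) : ls.foldl (fun m c => max m (f c)) a ≤ B := by
  induction ls generalizing a with
  | nil => simpa
  | cons x t ih =>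
    simp only [List.foldl_cons]
    exact ih (max a (f x)) (by have := hf x (by simp); omega) (fun c hc => hf c (by simp [hc]))

theorem pv_count_le_mx (c : Char) (hc : c ∈ pvLetters) (s : List Char) : List.count c s ≤ pvMx s :=
  (PySem.List.le_foldl_max_nat pvLetters (fun c => List.count c s) 0).2 c hc

theorem pv_count_filter_nodup (ls : List Char) (hnd : ls.Nodup) (p : Char → Bool) (c : Char) :
    List.count c (ls.filter p) = if c ∈ ls ∧ p c then 1 else 0 := by
  induction ls with
  | nil => simp
  | cons x t ih =>
    rcases List.nodup_cons.mp hnd with ⟨hx, hnd'⟩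
    rw [List.filter_cons]
    by_cases hpx : p x
    · simp only [hpx, if_pos]
      rw [List.count_cons, ih hnd']
      by_cases hc : c = x
      · subst hc; simp [hx, hpx]
      · simp [hc, Ne.symm hc]
    · simp only [hpx, Bool.false_eq_true, if_false]
      rw [ih hnd']
      by_cases hc : c = x
      · subst hc; simp [hpx, hx]
      · simp [hc]

theorem pv_loop_count (fuel : Nat) (s out : List Char)
    (hpre : ∀ c ∈ s, c ∈ pvLetters) (hfuel : pvMx s ≤ fuel) (c : Char) :
    List.count c (pvLoop fuel s out) =
      List.count c out + (if c ∈ pvLetters then pvMx s - List.count c s else 0) := by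
  induction fuel generalizing s out with
  | zero =>
    cases s with
    | nil => simp [pvLoop, pvMx]
    | cons x xs =>
      exfalso
      have h1 : 1 ≤ List.count x (x :: xs) := by simp [List.count_cons_self]
      have := pv_count_le_mx x (hpre x (by simp)) (x :: xs)
      omega
  | succ fuel ih =>
    cases s with
    | nil => simp [pvLoop, pvMx]
    | cons x xs =>
      have hcount' : ∀ d : Char, List.count d (pvLetters.reverse.foldl pvStep (x :: xs, out)).1
          = List.count d (x :: xs) - 1 := by
        intro d
        rw [(pv_pass pvLetters.reverse (by decide) (x :: xs) out).2 d]
        by_cases hd : d ∈ pvLetters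
        · simp [List.mem_reverse, hd]
        · have : d ∉ x :: xs := fun h => hd (hpre d h)
          simp [List.mem_reverse, hd, List.count_eq_zero.mpr this]
      have hpre' : ∀ d ∈ (pvLetters.reverse.foldl pvStep (x :: xs, out)).1, d ∈ pvLetters := by
        intro d hd
        have h0 : 0 < List.count d (pvLetters.reverse.foldl pvStep (x :: xs, out)).1 :=
          List.count_pos_iff.mpr hd
        rw [hcount' d] at h0
        exact hpre d (List.count_pos_iff.mp (by omega))
      have hmx' : pvMx (pvLetters.reverse.foldl pvStep (x :: xs, out)).1 = pvMx (x :: xs) - 1 := by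
        unfold pvMx
        have hcg := PySem.List.foldl_congr_mem
          (l := pvLetters) (init := (0 : Nat))
          (f := fun m d => max m (List.count d (pvLetters.reverse.foldl pvStep (x :: xs, out)).1))
          (g := fun m d => max m (List.count d (x :: xs) - 1))
          (fun acc d _ => by simp only; rw [hcount' d])
        rw [hcg]
        simpa using pv_foldl_max_sub pvLetters (fun d => List.count d (x :: xs)) 0
      have hmx1 : 1 ≤ pvMx (x :: xs) := by
        have h1 : 1 ≤ List.count x (x :: xs) := by simp [List.count_cons_self]
        have := pv_count_le_mx x (hpre x (by simp)) (x :: xs)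
        omega
      rw [pvLoop]
      rw [ih _ _ hpre' (by rw [hmx']; omega)]
      rw [(pv_pass pvLetters.reverse (by decide) (x :: xs) out).1, hmx', hcount' c]
      rw [List.count_append, pv_count_filter_nodup _ (by decide) _ c]
      by_cases hc : c ∈ pvLetters
      · have hle := pv_count_le_mx c hc (x :: xs)
        by_cases h0 : List.count c (x :: xs) = 0
        · simp [List.mem_reverse, hc, h0]
          omega
        · simp [List.mem_reverse, hc, h0]
          omega
      · have hni : c ∉ x :: xs := fun h => hc (hpre c h)
        simp [List.mem_reverse, hc, List.count_eq_zero.mpr hni]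

theorem pv_count_flatMap_replicate (l : List Char) (hnd : l.Nodup) (f : Char → Nat) (c : Char) :
    List.count c (l.flatMap fun x => List.replicate (f x) x) = if c ∈ l then f c else 0 := by
  induction l with
  | nil => simp
  | cons x t ih =>
    rcases List.nodup_cons.mp hnd with ⟨hx, hnd'⟩
    rw [List.flatMap_cons, List.count_append, ih hnd', List.count_replicate]
    by_cases hc : c = x
    · subst hc; simp [hx]
    · simp [hc, Ne.symm hc]

theorem pv_pairwise_flatMap (l : List Char) (hp : l.Pairwise (· < ·)) (f : Char → Nat) :
    (l.flatMap fun x => List.replicate (f x) x).Pairwise (· ≤ ·) := by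
  induction l with
  | nil => simp
  | cons x t ih =>
    rcases List.pairwise_cons.mp hp with ⟨hx, hp'⟩
    rw [List.flatMap_cons]
    apply List.pairwise_append.mpr
    refine ⟨List.pairwise_replicate.mpr (by simp), ih hp', ?_⟩
    intro a ha b hb
    have ha' : a = x := List.eq_of_mem_replicate ha
    obtain ⟨y, hy, hb'⟩ := List.mem_flatMap.mp hb
    have hb'' : b = y := List.eq_of_mem_replicate hb'
    subst ha'; subst hb''
    exact le_of_lt (hx _ hy)

theorem pv_m_eq (s : List Char) (hpre : ∀ c ∈ s, c ∈ pvLetters) :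
    PySem.List.maxD (PySem.Dict.counter s).values (fun v => v) 0 = (pvMx s : Int) := by
  have hvals : (PySem.Dict.counter s).values
      = (PySem.Set.ofList s).map (fun k => (List.count k s : Int)) := by
    rw [PySem.Dict.values_eq_map_keys _ (PySem.Dict.nodup_keys_counter s) 0,
        PySem.Dict.keys_counter]
    exact List.map_congr_left (fun k _ => PySem.Dict.getD_counter s k)
  cases s with
  | nil =>
    simp [hvals, PySem.List.maxD, pvMx]
    decide
  | cons x xs =>
    have hmem : x ∈ PySem.Set.ofList (x :: xs) := by
      rw [PySem.Set.mem_ofList]; simp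
    have hne : (PySem.Dict.counter (x :: xs)).values ≠ [] := by
      rw [hvals]
      intro h
      rw [List.map_eq_nil_iff.mp h] at hmem
      simp at hmem
    obtain ⟨v, hv⟩ : ∃ v, PySem.List.max? (PySem.Dict.counter (x :: xs)).values (fun v => v) = some v := by
      cases hmax : PySem.List.max? (PySem.Dict.counter (x :: xs)).values (fun v => v) with
      | none => exact absurd ((PySem.List.max?_eq_none_iff _ _).mp hmax) hne
      | some v => exact ⟨v, rfl⟩
    have hvmem := PySem.List.max?_mem hv
    have hvmax := PySem.List.max?_isMax hv
    rw [hvals] at hvmem hvmax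
    obtain ⟨k, hk, hkv⟩ := List.mem_map.mp hvmem
    have hk' : k ∈ (x :: xs) := (PySem.Set.mem_ofList _ _).mp hk
    have hv_le : v ≤ (pvMx (x :: xs) : Int) := by
      have := pv_count_le_mx k (hpre k hk') (x :: xs)
      omega
    have hv0 : 0 ≤ v := by
      rw [← hkv]; exact Int.natCast_nonneg _
    have hmx_le : (pvMx (x :: xs) : Int) ≤ v := by
      have hnat : pvMx (x :: xs) ≤ v.toNat := by
        apply pv_foldl_max_le
        · omega
        · intro c hc
          by_cases hcs : c ∈ (x :: xs)
          · have hle : (List.count c (x :: xs) : Int) ≤ v :=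
              hvmax _ (List.mem_map.mpr ⟨c, (PySem.Set.mem_ofList _ _).mpr hcs, rfl⟩)
            omega
          · have h0 := List.count_eq_zero.mpr hcs
            omega
      omega
    have hveq : v = (pvMx (x :: xs) : Int) := le_antisymm hv_le hmx_le
    unfold PySem.List.maxD
    rw [hv, hveq]
    rfl

theorem pv_final (s : String) (hpre : ∀ c ∈ s.toList, c ∈ pvLetters) :
    missing_alphabets s = missing_alphabets_alt s := by
  unfold missing_alphabets missing_alphabets_alt
  rw [PySem.Dict.foldl_insert_getD_add_one_eq_counter]
  show String.ofList (PySem.List.sorted (pvLoop (PySem.List.sorted s.toList (fun x => x)).length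
        (PySem.List.sorted s.toList (fun x => x)) []) (fun x => x))
      = String.ofList (pvAlphabet.flatMap (fun c =>
          List.replicate ((PySem.List.maxD (PySem.Dict.counter s.toList).values (fun v => v) 0
            - (PySem.Dict.counter s.toList).getD c 0)).toNat c))
  have hperm : (PySem.List.sorted s.toList (fun x => x)).Perm s.toList :=
    PySem.List.sorted_perm s.toList (fun x => x) false
  have hcnt : ∀ c, List.count c (PySem.List.sorted s.toList (fun x => x)) = List.count c s.toList :=
    fun c => hperm.count_eq c
  have hpresl : ∀ c ∈ PySem.List.sorted s.toList (fun x => x), c ∈ pvLetters :=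
    fun c hc => hpre c (hperm.subset hc)
  have hmx : pvMx (PySem.List.sorted s.toList (fun x => x)) = pvMx s.toList := by
    unfold pvMx
    exact PySem.List.foldl_congr_mem
      (l := pvLetters) (init := (0 : Nat))
      (f := fun m d => max m (List.count d (PySem.List.sorted s.toList (fun x => x))))
      (g := fun m d => max m (List.count d s.toList))
      (fun acc d _ => by simp only; rw [hcnt d])
  have hlen : pvMx (PySem.List.sorted s.toList (fun x => x))
      ≤ (PySem.List.sorted s.toList (fun x => x)).length := by
    apply pv_foldl_max_le
    · omega
    · exact fun c _ => List.count_le_length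
  have hm := pv_m_eq s.toList hpre
  have hcounts : ∀ c : Char,
      List.count c (pvLoop (PySem.List.sorted s.toList (fun x => x)).length
            (PySem.List.sorted s.toList (fun x => x)) [])
        = List.count c (pvAlphabet.flatMap (fun c =>
            List.replicate ((PySem.List.maxD (PySem.Dict.counter s.toList).values (fun v => v) 0
              - (PySem.Dict.counter s.toList).getD c 0)).toNat c)) := by
    intro c
    rw [pv_loop_count _ _ [] hpresl hlen, pv_count_flatMap_replicate pvAlphabet (by decide)]
    rw [hm]
    have halph : c ∈ pvAlphabet ↔ c ∈ pvLetters := Iff.rfl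
    by_cases hc : c ∈ pvLetters
    · rw [if_pos hc, if_pos (halph.mpr hc)]
      rw [PySem.Dict.getD_counter, hmx, hcnt]
      have h1 := pv_count_le_mx c hc s.toList
      simp only [List.count_nil, Nat.zero_add]
      omega
    · rw [if_neg hc, if_neg (fun h => hc (halph.mp h))]
      simp
  have hpw : (pvAlphabet.flatMap (fun c =>
      List.replicate ((PySem.List.maxD (PySem.Dict.counter s.toList).values (fun v => v) 0
        - (PySem.Dict.counter s.toList).getD c 0)).toNat c)).Pairwise (· ≤ ·) :=
    pv_pairwise_flatMap pvAlphabet (by decide) _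
  have hperm2 : (pvAlphabet.flatMap (fun c =>
      List.replicate ((PySem.List.maxD (PySem.Dict.counter s.toList).values (fun v => v) 0
        - (PySem.Dict.counter s.toList).getD c 0)).toNat c)).Perm
      (pvLoop (PySem.List.sorted s.toList (fun x => x)).length
        (PySem.List.sorted s.toList (fun x => x)) []) :=
    List.perm_iff_count.mpr (fun c => (hcounts c).symm)
  rw [PySem.List.sorted_id_eq_of_perm_of_pairwise _ _ hperm2 hpw]

-- ===== VERDICT (by name: the statement is the Claim_ definition above) =====
theorem missing_alphabets_spec : Claim_equal_missing_alphabets := by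
  intro s _ hpre
  unfold Spec_missing_alphabets
  refine pv_final s (fun c hc => ?_)
  exact of_decide_eq_true (List.all_eq_true.mp hpre c hc)
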